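-- pv_equiv track=rewrite | github.com/Saikyow/INF4lab | binary_to_ini.py | dict_to_ini_schedule_days
-- ===== SOURCE A (Python) =====
-- def dict_to_ini_schedule_days(data):
--     lines = []
--
--     schedules = data.get("schedule", {})
--
--     DAY_ORDER = [
--         "monday",
--         "tuesday",
--         "wednesday",
--         "thursday",
--         "friday",
--         "saturday",
--         "sunday",
--     ]
--
--     def day_index(day):
--         try:
--             return DAY_ORDER.index(day)
--         except ValueError:
--             return len(DAY_ORDER)  # плохие дни в конец
--
--     for day in sorted(schedules.keys(), key=day_index):
--         day_data = schedules[day]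
--         classes = day_data.get("class", {})
--
--         lines.append("[schedule]")
--         lines.append(f"day = {day}")
--         lines.append("type = class")
--         lines.append("")
--
--         # сортировка занятий по времени
--         for time in sorted(classes.keys()):
--             lesson = classes[time]
--
--             lines.append(f"time = {time}")
--
--             for k, v in sorted(lesson.items()):
--                 if k == "type":
--                     lines.append(f"lesson_type = {v}")
--                 else:
--                     lines.append(f"{k} = {v}")
--
--             lines.append("")
--
--         if lines[-1] == "":
--             lines.pop()
--         lines.append("")
--
--     if lines and lines[-1] == "":
--         lines.pop()
--
--     return "\n".join(lines)
-- ===== SOURCE B (Python) =====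
-- DAY_ORDER = ["monday", "tuesday", "wednesday", "thursday",
--              "friday", "saturday", "sunday"]
--
--
-- def dict_to_ini_schedule_days(data):
--     sched = data.get("schedule", {})
--     # No comparison sort over days: walk the fixed week order and pick the
--     # present ones (each rank occurs at most once among dict keys), then the
--     # unknown days in dict order -- exactly what a stable sort by rank yields.
--     days = [d for d in DAY_ORDER if d in sched] + \
--            [d for d in sched if d not in DAY_ORDER]
--     blocks = []
--     for day in days:
--         blocks.append(f"[schedule]\nday = {day}\ntype = class")
--         classes = sched[day].get("class", {})
--         for time in sorted(classes):
--             rows = [f"time = {time}"]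
--             for k, v in sorted(classes[time].items()):
--                 rows.append(f"lesson_type = {v}" if k == "type" else f"{k} = {v}")
--             blocks.append("\n".join(rows))
--     return "\n\n".join(blocks)
-- ===== Notes on version B (the rewrite author's own statement) =====
-- stated objective: simpler
-- what changed: B eliminates the comparison sort over days entirely: it walks the fixed 7-day week order picking the keys that are present and then appends the unknown keys in dict order (correct because dict keys are unique, so each rank occurs at most once and rank-7 keys keep insertion order exactly as A's stable sorted does), and it emits each INI section as a self-contained text block joined with '\n\n' instead of A's flat line buffer with sentinel blank lines and two conditional pop() cleanups.
import Mathlib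
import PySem

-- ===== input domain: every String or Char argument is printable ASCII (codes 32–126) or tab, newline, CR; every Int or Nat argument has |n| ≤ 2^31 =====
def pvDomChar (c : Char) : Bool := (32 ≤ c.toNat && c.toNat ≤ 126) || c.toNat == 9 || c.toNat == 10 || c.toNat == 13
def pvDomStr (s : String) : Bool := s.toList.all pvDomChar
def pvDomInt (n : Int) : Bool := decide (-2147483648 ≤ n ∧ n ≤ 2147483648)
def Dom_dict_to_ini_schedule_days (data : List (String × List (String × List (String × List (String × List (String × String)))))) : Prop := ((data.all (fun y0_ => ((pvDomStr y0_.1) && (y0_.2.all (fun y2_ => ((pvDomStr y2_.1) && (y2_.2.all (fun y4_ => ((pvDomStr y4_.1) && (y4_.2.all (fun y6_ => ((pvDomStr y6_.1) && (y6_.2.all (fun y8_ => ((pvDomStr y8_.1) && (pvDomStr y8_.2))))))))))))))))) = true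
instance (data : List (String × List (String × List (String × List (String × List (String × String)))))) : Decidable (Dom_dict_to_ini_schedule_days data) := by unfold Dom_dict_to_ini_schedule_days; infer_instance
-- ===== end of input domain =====

-- B removes the comparison sort over days (it walks the fixed week order and picks the
-- present keys, then the unknown keys in dict order) and emits self-contained text
-- blocks joined with "\n\n" instead of A's flat line buffer with sentinel-blank pops
-- (objective: simpler).

-- ===== PORT A =====
def pvDayOrderA : List String :=
  ["monday", "tuesday", "wednesday", "thursday", "friday", "saturday", "sunday"]

-- try: DAY_ORDER.index(day) / except ValueError: len(DAY_ORDER) — index? = none is exactly the ValueError case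
def pvDayIndexA (day : String) : Int :=
  match PySem.List.index? pvDayOrderA day with
  | some i => (i : Int)
  | none => (pvDayOrderA.length : Int)

def dict_to_ini_schedule_days (data : List (String × List (String × List (String × List (String × List (String × String)))))) : String :=
  let schedules := PySem.Dict.ofList ((PySem.Dict.ofList data).getD "schedule" [])
  let lines := (PySem.List.sorted schedules.keys pvDayIndexA false).foldl (fun lines day =>
    -- schedules[day]: day comes from schedules.keys, so the lookup never raises; getD's default is unreachable
    let day_data := PySem.Dict.ofList (schedules.getD day [])
    let classes := PySem.Dict.ofList (day_data.getD "class" [])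
    let lines := lines ++ ["[schedule]", "day = " ++ day, "type = class", ""]
    let lines := (PySem.List.sorted classes.keys (fun t => t) false).foldl (fun lines time =>
      let lesson := PySem.Dict.ofList (classes.getD time [])
      let lines := lines ++ ["time = " ++ time]
      let lines := (PySem.List.sorted2 lesson.items (·.1) (·.2) false).foldl (fun lines kv =>
        if kv.1 == "type" then lines ++ ["lesson_type = " ++ kv.2]
        else lines ++ [kv.1 ++ " = " ++ kv.2]) lines
      lines ++ [""]) lines
    -- if lines[-1] == "": lines.pop()  (lines is nonempty here, so lines[-1] is getLast?)
    let lines := if lines.getLast? == some "" then lines.dropLast else lines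
    lines ++ [""]) []
  -- if lines and lines[-1] == "": lines.pop()
  let lines := if lines.getLast? == some "" then lines.dropLast else lines
  PySem.Str.join "\n" lines

-- ===== PORT B =====
-- B's DAY_ORDER is the same literal list as A's: the port reuses pvDayOrderA
def dict_to_ini_schedule_days_alt (data : List (String × List (String × List (String × List (String × List (String × String)))))) : String :=
  let schedules := PySem.Dict.ofList ((PySem.Dict.ofList data).getD "schedule" [])
  -- days = [d for d in DAY_ORDER if d in sched] + [d for d in sched if d not in DAY_ORDER]
  let days := pvDayOrderA.filter (fun d => schedules.contains d) ++
              schedules.keys.filter (fun d => !(pvDayOrderA.contains d))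
  let blocks := days.foldl (fun blocks day =>
    let blocks := blocks ++ ["[schedule]\nday = " ++ day ++ "\ntype = class"]
    let classes := PySem.Dict.ofList ((PySem.Dict.ofList (schedules.getD day [])).getD "class" [])
    (PySem.List.sorted classes.keys (fun t => t) false).foldl (fun blocks time =>
      let rows := ("time = " ++ time) ::
        (PySem.List.sorted2 (PySem.Dict.ofList (classes.getD time [])).items (·.1) (·.2) false).map
          (fun kv => if kv.1 == "type" then "lesson_type = " ++ kv.2 else kv.1 ++ " = " ++ kv.2)
      blocks ++ [PySem.Str.join "\n" rows]) blocks) []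
  PySem.Str.join "\n\n" blocks

-- ===== PRECONDITION & SPEC =====
def Spec_dict_to_ini_schedule_days (data : List (String × List (String × List (String × List (String × List (String × String)))))) (out : String) : Prop := out = dict_to_ini_schedule_days_alt data
instance (data : List (String × List (String × List (String × List (String × List (String × String)))))) (out : String) : Decidable (Spec_dict_to_ini_schedule_days data out) := by unfold Spec_dict_to_ini_schedule_days; infer_instance

-- ===== CLAIM (what is proved, stated in full; the proofs are below) =====
def Claim_equal_dict_to_ini_schedule_days : Prop := ∀ (data : List (String × List (String × List (String × List (String × List (String × String)))))), Dom_dict_to_ini_schedule_days data → Spec_dict_to_ini_schedule_days data (dict_to_ini_schedule_days data)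


-- ===== LEMMAS AND PROOFS =====

-- the separator-block shape of A's line buffer: every block followed by one blank line
def pvFS (bs : List (List String)) : List String := bs.flatMap (fun b => b ++ [""])

def pvFC (bs : List (List (List Char))) : List (List Char) := bs.flatMap (fun b => b ++ [[]])

def pvItemLine (kv : String × String) : String :=
  if kv.1 == "type" then "lesson_type = " ++ kv.2 else kv.1 ++ " = " ++ kv.2

def pvClassesOf (schedules : PySem.Dict String (List (String × List (String × List (String × String))))) (day : String) : PySem.Dict String (List (String × String)) :=
  PySem.Dict.ofList ((PySem.Dict.ofList (schedules.getD day [])).getD "class" [])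

def pvTimeRows (classes : PySem.Dict String (List (String × String))) (time : String) : List String :=
  ("time = " ++ time) ::
    (PySem.List.sorted2 (PySem.Dict.ofList (classes.getD time [])).items (·.1) (·.2) false).map pvItemLine

def pvDayBlocks (schedules : PySem.Dict String (List (String × List (String × List (String × String))))) (day : String) : List (List String) :=
  ["[schedule]", "day = " ++ day, "type = class"] ::
    (PySem.List.sorted (pvClassesOf schedules day).keys (fun t => t) false).map (pvTimeRows (pvClassesOf schedules day))

def pvBlocks (schedules : PySem.Dict String (List (String × List (String × List (String × String))))) : List (List String) :=
  (PySem.List.sorted schedules.keys pvDayIndexA false).flatMap (pvDayBlocks schedules)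

theorem pvJoinAppendCons (sep : List Char) (xs : List (List Char)) (hxs : xs ≠ []) (y : List Char) (ys : List (List Char)) :
    PySem.Chars.join sep (xs ++ y :: ys) = PySem.Chars.join sep xs ++ sep ++ PySem.Chars.join sep (y :: ys) := by
  induction xs with
  | nil => exact absurd rfl hxs
  | cons a xs ih =>
    cases xs with
    | nil => simp [PySem.Chars.join_cons_cons, PySem.Chars.join_singleton]
    | cons b xs' =>
      have h1 : (a :: b :: xs') ++ y :: ys = a :: ((b :: xs') ++ y :: ys) := by simp
      have h2 : (b :: xs') ++ y :: ys = b :: (xs' ++ y :: ys) := by simp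
      rw [h1, h2, PySem.Chars.join_cons_cons, ← h2, ih (by simp), PySem.Chars.join_cons_cons]
      simp [List.append_assoc]

theorem pvFC_ne_nil (b : List (List Char)) (bs : List (List (List Char))) : pvFC (b :: bs) ≠ [] := by
  simp [pvFC]

theorem pvFC_dropLast_ne_nil (b : List (List Char)) (hb : b ≠ []) (bs : List (List (List Char))) :
    (pvFC (b :: bs)).dropLast ≠ [] := by
  show ((b ++ [[]]) ++ pvFC bs).dropLast ≠ []
  cases hfc : pvFC bs with
  | nil => simpa [List.dropLast_concat] using hb
  | cons c cs => rw [List.dropLast_append_of_ne_nil (by simp)]; simp [hb]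

theorem pvCharsJoinBlocks (bs : List (List (List Char))) (h : ∀ b ∈ bs, b ≠ []) :
    PySem.Chars.join ['\n'] (pvFC bs).dropLast
      = PySem.Chars.join ['\n', '\n'] (bs.map (PySem.Chars.join ['\n'])) := by
  induction bs with
  | nil => simp [pvFC, PySem.Chars.join_nil]
  | cons b bs ih =>
    have hb : b ≠ [] := h b (by simp)
    have h' : ∀ x ∈ bs, x ≠ [] := fun x hx => h x (by simp [hx])
    cases bs with
    | nil =>
      show PySem.Chars.join ['\n'] ((b ++ [[]]) ++ pvFC []).dropLast = _
      simp [pvFC, PySem.Chars.join_singleton]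
    | cons c cs =>
      have hc : c ≠ [] := h' c (by simp)
      have hdl : (pvFC (c :: cs)).dropLast ≠ [] := pvFC_dropLast_ne_nil c hc cs
      show PySem.Chars.join ['\n'] ((b ++ [[]]) ++ pvFC (c :: cs)).dropLast = _
      rw [List.dropLast_append_of_ne_nil (pvFC_ne_nil c cs), List.append_assoc]
      have h3 : [[]] ++ (pvFC (c :: cs)).dropLast = [] :: (pvFC (c :: cs)).dropLast := rfl
      rw [h3, pvJoinAppendCons ['\n'] b hb [] ((pvFC (c :: cs)).dropLast)]
      obtain ⟨u, us, hu⟩ := List.exists_cons_of_ne_nil hdl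
      rw [hu, PySem.Chars.join_cons_cons, ← hu, ih h']
      simp [PySem.Chars.join_cons_cons, List.append_assoc]

theorem pvStrJoinBlocks (bs : List (List String)) (h : ∀ b ∈ bs, b ≠ []) :
    PySem.Str.join "\n" (pvFS bs).dropLast
      = PySem.Str.join "\n\n" (bs.map (PySem.Str.join "\n")) := by
  apply String.toList_inj.mp
  rw [PySem.Str.toList_join, PySem.Str.toList_join]
  have h1 : List.map String.toList (pvFS bs).dropLast = (pvFC (bs.map (List.map String.toList))).dropLast := by
    rw [List.map_dropLast]
    congr 1
    simp [pvFS, pvFC, List.map_flatMap, List.flatMap_map]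
  have h2 : List.map String.toList (bs.map (PySem.Str.join "\n"))
      = (bs.map (List.map String.toList)).map (PySem.Chars.join ['\n']) := by
    simp only [List.map_map]
    apply List.map_congr_left
    intro b _
    simp [Function.comp, PySem.Str.toList_join]
  rw [h1, h2]
  have hsep : ("\n" : String).toList = ['\n'] := rfl
  have hsep2 : ("\n\n" : String).toList = ['\n', '\n'] := rfl
  rw [hsep, hsep2]
  apply pvCharsJoinBlocks
  intro b hb
  simp only [List.mem_map] at hb
  obtain ⟨x, hx, rfl⟩ := hb
  simpa using h x hx

theorem pvFS_concat (bs : List (List String)) (h : bs ≠ []) : ∃ pre, pvFS bs = pre ++ [""] := by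
  induction bs with
  | nil => exact absurd rfl h
  | cons b bs ih =>
    cases bs with
    | nil => exact ⟨b, by simp [pvFS]⟩
    | cons c cs =>
      obtain ⟨pre, hpre⟩ := ih (by simp)
      refine ⟨b ++ [""] ++ pre, ?_⟩
      show (b ++ [""]) ++ pvFS (c :: cs) = (b ++ [""] ++ pre) ++ [""]
      rw [hpre]
      simp [List.append_assoc]

theorem pvBlocks_ne (S : PySem.Dict String (List (String × List (String × List (String × String))))) :
    ∀ b ∈ pvBlocks S, b ≠ [] := by
  intro b hb
  simp only [pvBlocks, List.mem_flatMap, pvDayBlocks, List.mem_cons, List.mem_map] at hb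
  obtain ⟨day, _, hb⟩ := hb
  rcases hb with rfl | ⟨t, _, rfl⟩
  · simp
  · simp [pvTimeRows]

theorem pvA_eq (data : List (String × List (String × List (String × List (String × List (String × String)))))) :
    dict_to_ini_schedule_days data
      = PySem.Str.join "\n" (pvFS (pvBlocks (PySem.Dict.ofList ((PySem.Dict.ofList data).getD "schedule" [])))).dropLast := by
  simp only [dict_to_ini_schedule_days]
  have hday : (fun (lines : List String) (day : String) =>
      (if ((PySem.List.sorted (PySem.Dict.ofList ((PySem.Dict.ofList ((PySem.Dict.ofList ((PySem.Dict.ofList data).getD "schedule" [])).getD day [])).getD "class" [])).keys (fun t => t) false).foldl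
            (fun lines time =>
              ((PySem.List.sorted2 (PySem.Dict.ofList ((PySem.Dict.ofList ((PySem.Dict.ofList ((PySem.Dict.ofList ((PySem.Dict.ofList data).getD "schedule" [])).getD day [])).getD "class" [])).getD time [])).items (·.1) (·.2) false).foldl
                (fun lines kv =>
                  if kv.1 == "type" then lines ++ ["lesson_type = " ++ kv.2]
                  else lines ++ [kv.1 ++ " = " ++ kv.2])
                (lines ++ ["time = " ++ time])) ++ [""])
            (lines ++ ["[schedule]", "day = " ++ day, "type = class", ""])).getLast? == some "" then
          ((PySem.List.sorted (PySem.Dict.ofList ((PySem.Dict.ofList ((PySem.Dict.ofList ((PySem.Dict.ofList data).getD "schedule" [])).getD day [])).getD "class" [])).keys (fun t => t) false).foldl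
            (fun lines time =>
              ((PySem.List.sorted2 (PySem.Dict.ofList ((PySem.Dict.ofList ((PySem.Dict.ofList ((PySem.Dict.ofList ((PySem.Dict.ofList data).getD "schedule" [])).getD day [])).getD "class" [])).getD time [])).items (·.1) (·.2) false).foldl
                (fun lines kv =>
                  if kv.1 == "type" then lines ++ ["lesson_type = " ++ kv.2]
                  else lines ++ [kv.1 ++ " = " ++ kv.2])
                (lines ++ ["time = " ++ time])) ++ [""])
            (lines ++ ["[schedule]", "day = " ++ day, "type = class", ""])).dropLast
        else
          ((PySem.List.sorted (PySem.Dict.ofList ((PySem.Dict.ofList ((PySem.Dict.ofList ((PySem.Dict.ofList data).getD "schedule" [])).getD day [])).getD "class" [])).keys (fun t => t) false).foldl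
            (fun lines time =>
              ((PySem.List.sorted2 (PySem.Dict.ofList ((PySem.Dict.ofList ((PySem.Dict.ofList ((PySem.Dict.ofList ((PySem.Dict.ofList data).getD "schedule" [])).getD day [])).getD "class" [])).getD time [])).items (·.1) (·.2) false).foldl
                (fun lines kv =>
                  if kv.1 == "type" then lines ++ ["lesson_type = " ++ kv.2]
                  else lines ++ [kv.1 ++ " = " ++ kv.2])
                (lines ++ ["time = " ++ time])) ++ [""])
            (lines ++ ["[schedule]", "day = " ++ day, "type = class", ""]))) ++ [""])
      = fun (lines : List String) (day : String) =>
          lines ++ pvFS (pvDayBlocks (PySem.Dict.ofList ((PySem.Dict.ofList data).getD "schedule" [])) day) := by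
    funext lines day
    have eItem : (fun (lines : List String) (kv : String × String) =>
        if kv.1 == "type" then lines ++ ["lesson_type = " ++ kv.2]
        else lines ++ [kv.1 ++ " = " ++ kv.2]) = fun lines kv => lines ++ [pvItemLine kv] := by
      funext lines kv
      by_cases h : kv.1 == "type" <;> simp [pvItemLine, h]
    have eTime : (fun (lines : List String) (time : String) =>
        ((PySem.List.sorted2 (PySem.Dict.ofList ((pvClassesOf (PySem.Dict.ofList ((PySem.Dict.ofList data).getD "schedule" [])) day).getD time [])).items (·.1) (·.2) false).foldl
          (fun lines kv =>
            if kv.1 == "type" then lines ++ ["lesson_type = " ++ kv.2]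
            else lines ++ [kv.1 ++ " = " ++ kv.2])
          (lines ++ ["time = " ++ time])) ++ [""])
        = fun (lines : List String) (time : String) =>
            lines ++ (pvTimeRows (pvClassesOf (PySem.Dict.ofList ((PySem.Dict.ofList data).getD "schedule" [])) day) time ++ [""]) := by
      funext lines time
      rw [eItem, PySem.List.foldl_append_singleton_eq_map]
      simp [pvTimeRows]
    show (if (_ : List String).getLast? == some "" then _ else _) ++ [""] = _
    rw [show (pvClassesOf (PySem.Dict.ofList ((PySem.Dict.ofList data).getD "schedule" [])) day) = PySem.Dict.ofList ((PySem.Dict.ofList ((PySem.Dict.ofList ((PySem.Dict.ofList data).getD "schedule" [])).getD day [])).getD "class" []) from rfl] at eTime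
    rw [eTime, PySem.List.foldl_append_eq_flatMap]
    have hfs : pvFS (pvDayBlocks (PySem.Dict.ofList ((PySem.Dict.ofList data).getD "schedule" [])) day)
        = ["[schedule]", "day = " ++ day, "type = class", ""] ++
          (PySem.List.sorted (PySem.Dict.ofList ((PySem.Dict.ofList ((PySem.Dict.ofList ((PySem.Dict.ofList data).getD "schedule" [])).getD day [])).getD "class" [])).keys (fun t => t) false).flatMap
            (fun time => pvTimeRows (PySem.Dict.ofList ((PySem.Dict.ofList ((PySem.Dict.ofList ((PySem.Dict.ofList data).getD "schedule" [])).getD day [])).getD "class" [])) time ++ [""]) := by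
      simp [pvFS, pvDayBlocks, pvClassesOf, List.flatMap_map]
    have hassoc : (lines ++ ["[schedule]", "day = " ++ day, "type = class", ""]) ++
          (PySem.List.sorted (PySem.Dict.ofList ((PySem.Dict.ofList ((PySem.Dict.ofList ((PySem.Dict.ofList data).getD "schedule" [])).getD day [])).getD "class" [])).keys (fun t => t) false).flatMap
            (fun time => pvTimeRows (PySem.Dict.ofList ((PySem.Dict.ofList ((PySem.Dict.ofList ((PySem.Dict.ofList data).getD "schedule" [])).getD day [])).getD "class" [])) time ++ [""])
        = lines ++ pvFS (pvDayBlocks (PySem.Dict.ofList ((PySem.Dict.ofList data).getD "schedule" [])) day) := by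
      rw [hfs, List.append_assoc]
    rw [hassoc]
    obtain ⟨pre, hpre⟩ := pvFS_concat (pvDayBlocks (PySem.Dict.ofList ((PySem.Dict.ofList data).getD "schedule" [])) day) (by simp [pvDayBlocks])
    rw [hpre, ← List.append_assoc, List.getLast?_concat]
    simp
  rw [hday, PySem.List.foldl_append_eq_flatMap]
  have hfl : (PySem.List.sorted (PySem.Dict.ofList ((PySem.Dict.ofList data).getD "schedule" [])).keys pvDayIndexA false).flatMap
        (fun day => pvFS (pvDayBlocks (PySem.Dict.ofList ((PySem.Dict.ofList data).getD "schedule" [])) day))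
      = pvFS (pvBlocks (PySem.Dict.ofList ((PySem.Dict.ofList data).getD "schedule" []))) := by
    simp [pvFS, pvBlocks, List.flatMap_assoc]
  rw [List.nil_append, hfl]
  rcases hbs : pvFS (pvBlocks (PySem.Dict.ofList ((PySem.Dict.ofList data).getD "schedule" []))) with _ | ⟨c, cs⟩
  · simp
  · rcases hnil : pvBlocks (PySem.Dict.ofList ((PySem.Dict.ofList data).getD "schedule" [])) with _ | ⟨b, bs⟩
    · rw [hnil] at hbs; simp [pvFS] at hbs
    · obtain ⟨pre, hpre⟩ := pvFS_concat (b :: bs) (by simp)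
      rw [hnil] at hbs
      rw [← hbs, hpre, List.getLast?_concat]
      simp

-- ---- B side: the day list without a sort equals A's stable sort by day rank ----

theorem pvInsertBy_prepend {α : Type} (before : α → α → Bool) (x : α) (A B : List α)
    (hA : ∀ a ∈ A, before x a = false) :
    PySem.List.insertBy before x (A ++ B) = A ++ PySem.List.insertBy before x B := by
  induction A with
  | nil => simp
  | cons a A ih =>
    have ha : before x a = false := hA a (by simp)
    show PySem.List.insertBy before x (a :: (A ++ B)) = a :: (A ++ PySem.List.insertBy before x B)
    rw [show PySem.List.insertBy before x (a :: (A ++ B))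
        = if before x a then x :: a :: (A ++ B) else a :: PySem.List.insertBy before x (A ++ B) from rfl,
      ha]
    simp [ih (fun a ha' => hA a (by simp [ha']))]

theorem pvInsertBy_all_before {α : Type} (before : α → α → Bool) (x : α) (B : List α)
    (hB : ∀ b ∈ B, before x b = true) :
    PySem.List.insertBy before x B = x :: B := by
  cases B with
  | nil => rfl
  | cons b B' =>
    rw [show PySem.List.insertBy before x (b :: B')
        = if before x b then x :: b :: B' else b :: PySem.List.insertBy before x B' from rfl,
      hB b (by simp)]
    simp

theorem pvInsertRank (d : String) (rs : List Int) (f : Int → List String)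
    (hseg : ∀ r ∈ rs, ∀ a ∈ f r, pvDayIndexA a = r)
    (hmem : pvDayIndexA d ∈ rs) (hsort : rs.Pairwise (· < ·)) :
    PySem.List.insertBy (fun a b => decide (pvDayIndexA a < pvDayIndexA b)) d (rs.flatMap f)
      = rs.flatMap (fun r => f r ++ if pvDayIndexA d == r then [d] else []) := by
  induction rs with
  | nil => simp at hmem
  | cons r rs ih =>
    have hlt := (List.pairwise_cons.mp hsort).1
    have hsort' := (List.pairwise_cons.mp hsort).2
    by_cases h : pvDayIndexA d = r
    · have hA : ∀ a ∈ f r, decide (pvDayIndexA d < pvDayIndexA a) = false := by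
        intro a ha
        rw [hseg r (by simp) a ha, h]
        simp
      have hB : ∀ b ∈ rs.flatMap f, decide (pvDayIndexA d < pvDayIndexA b) = true := by
        intro b hb
        simp only [List.mem_flatMap] at hb
        obtain ⟨r', hr', hb⟩ := hb
        rw [hseg r' (by simp [hr']) b hb]
        simp [h, hlt r' hr']
      rw [List.flatMap_cons, pvInsertBy_prepend _ _ _ _ hA, pvInsertBy_all_before _ _ _ hB]
      have hrest : rs.flatMap (fun r' => f r' ++ if pvDayIndexA d == r' then [d] else []) = rs.flatMap f := by
        apply List.flatMap_congr
        intro r' hr'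
        have hne : pvDayIndexA d ≠ r' := by have := hlt r' hr'; omega
        simp [hne]
      rw [List.flatMap_cons, hrest]
      simp [h]
    · have hd' : pvDayIndexA d ∈ rs := by
        rcases List.mem_cons.mp hmem with h' | h'
        · exact absurd h' h
        · exact h'
      have hA : ∀ a ∈ f r, decide (pvDayIndexA d < pvDayIndexA a) = false := by
        intro a ha
        rw [hseg r (by simp) a ha]
        have := hlt _ hd'
        simp only [decide_eq_false_iff_not, not_lt]
        omega
      rw [List.flatMap_cons, pvInsertBy_prepend _ _ _ _ hA,
        ih (fun r' hr' => hseg r' (by simp [hr'])) hd' hsort', List.flatMap_cons]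
      have hne : (pvDayIndexA d == r) = false := by simp [h]
      simp [hne]

theorem pvDayIndexA_bounds (d : String) : 0 ≤ pvDayIndexA d ∧ pvDayIndexA d ≤ 7 := by
  unfold pvDayIndexA
  cases h : PySem.List.index? pvDayOrderA d with
  | none => simp [pvDayOrderA]
  | some i =>
    obtain ⟨pre, suf, hx, hlen, -⟩ := (PySem.List.index?_eq_some_iff _ _ _).mp h
    have h7 : pre.length + (suf.length + 1) = 7 := by
      have := congrArg List.length hx
      simpa [pvDayOrderA] using this.symm
    simp only []
    omega

theorem pvRank_mem (d : String) : pvDayIndexA d ∈ ([0, 1, 2, 3, 4, 5, 6, 7] : List Int) := by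
  have hb := pvDayIndexA_bounds d
  simp only [List.mem_cons, List.not_mem_nil, or_false]
  omega

theorem pvDayIndexA_getD : ∀ r ∈ List.range 7, pvDayIndexA (pvDayOrderA.getD r "") = (r : Int) := by
  decide

theorem pvDayIndexA_eq_iff (d : String) (r : Nat) (hr : r < 7) :
    pvDayIndexA d = (r : Int) ↔ d = pvDayOrderA.getD r "" := by
  constructor
  · intro h
    cases hidx : PySem.List.index? pvDayOrderA d with
    | none =>
      have h7 : pvDayIndexA d = 7 := by unfold pvDayIndexA; rw [hidx]; rfl
      rw [h7] at h
      omega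
    | some i =>
      have hieq : pvDayIndexA d = (i : Int) := by unfold pvDayIndexA; rw [hidx]
      have hir : i = r := by rw [hieq] at h; exact_mod_cast h
      obtain ⟨hk, hd, -⟩ := PySem.List.getElem_of_index?_eq_some hidx
      subst hir
      rw [← hd, List.getD_eq_getElem _ _ hk]
  · intro h
    subst h
    exact pvDayIndexA_getD r (List.mem_range.mpr hr)

theorem pvDayIndexA_eq_seven_iff (d : String) : pvDayIndexA d = 7 ↔ d ∉ pvDayOrderA := by
  constructor
  · intro h hmem
    have hidx : PySem.List.index? pvDayOrderA d ≠ none := by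
      rw [Ne, PySem.List.index?_eq_none_iff]
      simp [hmem]
    cases hidx2 : PySem.List.index? pvDayOrderA d with
    | none => exact hidx hidx2
    | some i =>
      obtain ⟨pre, suf, hx, hlen, -⟩ := (PySem.List.index?_eq_some_iff _ _ _).mp hidx2
      have h7 : pre.length + (suf.length + 1) = 7 := by
        have := congrArg List.length hx
        simpa [pvDayOrderA] using this.symm
      have hieq : pvDayIndexA d = (i : Int) := by unfold pvDayIndexA; rw [hidx2]
      rw [hieq] at h
      omega
  · intro h
    have hidx : PySem.List.index? pvDayOrderA d = none := (PySem.List.index?_eq_none_iff _ _).mpr (by simpa using h)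
    unfold pvDayIndexA
    rw [hidx]
    rfl

theorem pvSortedEqFlat (xs : List String) :
    PySem.List.sorted xs pvDayIndexA false
      = ([0, 1, 2, 3, 4, 5, 6, 7] : List Int).flatMap (fun r => xs.filter (fun x => pvDayIndexA x == r)) := by
  induction xs using List.reverseRecOn with
  | nil => simp [PySem.List.sorted]
  | append_singleton ys x ih =>
    rw [PySem.List.sorted_eq_foldl_insertBy, List.foldl_append, ← PySem.List.sorted_eq_foldl_insertBy, ih]
    simp only [List.foldl_cons, List.foldl_nil]
    rw [pvInsertRank x _ _ (by
        intro r hr a ha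
        simpa using (List.mem_filter.mp ha).2)
      (pvRank_mem x) (by decide)]
    apply List.flatMap_congr
    intro r hr
    rw [List.filter_append]
    simp [List.filter_singleton]

theorem pvFilterRankLt7 (keys : List String) (hnd : keys.Nodup) (r : Nat) (hr : r < 7)
    (day : String) (hday : pvDayOrderA.getD r "" = day) :
    keys.filter (fun d => pvDayIndexA d == (r : Int)) = if day ∈ keys then [day] else [] := by
  subst hday
  have hpt : ∀ d ∈ keys, (pvDayIndexA d == (r : Int)) = (d == pvDayOrderA.getD r "") := by
    intro d _
    by_cases h : pvDayIndexA d = (r : Int)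
    · have heq := (pvDayIndexA_eq_iff d r hr).mp h
      rw [beq_iff_eq.mpr h, beq_iff_eq.mpr heq]
    · have hne : d ≠ pvDayOrderA.getD r "" := fun he => h ((pvDayIndexA_eq_iff d r hr).mpr he)
      rw [beq_eq_false_iff_ne.mpr h, beq_eq_false_iff_ne.mpr hne]
  rw [List.filter_congr hpt, List.filter_beq]
  by_cases hm : pvDayOrderA.getD r "" ∈ keys
  · rw [if_pos hm, List.count_eq_one_of_mem hnd hm, List.replicate_one]
  · rw [if_neg hm, List.count_eq_zero_of_not_mem hm, List.replicate_zero]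

theorem pvFilterRank7 (keys : List String) :
    keys.filter (fun d => pvDayIndexA d == (7 : Int))
      = keys.filter (fun d => !(pvDayOrderA.contains d)) := by
  apply List.filter_congr
  intro d _
  by_cases h : d ∈ pvDayOrderA
  · have hne : pvDayIndexA d ≠ 7 := fun he => (pvDayIndexA_eq_seven_iff d).mp he h
    have hc : pvDayOrderA.contains d = true := by
      simpa [pvDayOrderA] using h
    rw [hc]
    simp [hne]
  · have heq : pvDayIndexA d = 7 := (pvDayIndexA_eq_seven_iff d).mpr h
    have hc : pvDayOrderA.contains d = false := by
      simpa [pvDayOrderA] using h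
    rw [hc]
    simp [heq]

set_option maxHeartbeats 2000000 in
theorem pvDaysEq (ps : List (String × List (String × List (String × List (String × String))))) :
    pvDayOrderA.filter (fun d => (PySem.Dict.ofList ps).contains d)
        ++ (PySem.Dict.ofList ps).keys.filter (fun d => !(pvDayOrderA.contains d))
      = PySem.List.sorted (PySem.Dict.ofList ps).keys pvDayIndexA false := by
  have hnd := PySem.Dict.nodup_keys_ofList ps
  have e0 : (PySem.Dict.ofList ps).keys.filter (fun d => pvDayIndexA d == (0 : Int))
      = if "monday" ∈ (PySem.Dict.ofList ps).keys then ["monday"] else [] := by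
    have := pvFilterRankLt7 _ hnd 0 (by omega) "monday" rfl
    simpa using this
  have e1 : (PySem.Dict.ofList ps).keys.filter (fun d => pvDayIndexA d == (1 : Int))
      = if "tuesday" ∈ (PySem.Dict.ofList ps).keys then ["tuesday"] else [] := by
    have := pvFilterRankLt7 _ hnd 1 (by omega) "tuesday" rfl
    simpa using this
  have e2 : (PySem.Dict.ofList ps).keys.filter (fun d => pvDayIndexA d == (2 : Int))
      = if "wednesday" ∈ (PySem.Dict.ofList ps).keys then ["wednesday"] else [] := by
    have := pvFilterRankLt7 _ hnd 2 (by omega) "wednesday" rfl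
    simpa using this
  have e3 : (PySem.Dict.ofList ps).keys.filter (fun d => pvDayIndexA d == (3 : Int))
      = if "thursday" ∈ (PySem.Dict.ofList ps).keys then ["thursday"] else [] := by
    have := pvFilterRankLt7 _ hnd 3 (by omega) "thursday" rfl
    simpa using this
  have e4 : (PySem.Dict.ofList ps).keys.filter (fun d => pvDayIndexA d == (4 : Int))
      = if "friday" ∈ (PySem.Dict.ofList ps).keys then ["friday"] else [] := by
    have := pvFilterRankLt7 _ hnd 4 (by omega) "friday" rfl
    simpa using this
  have e5 : (PySem.Dict.ofList ps).keys.filter (fun d => pvDayIndexA d == (5 : Int))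
      = if "saturday" ∈ (PySem.Dict.ofList ps).keys then ["saturday"] else [] := by
    have := pvFilterRankLt7 _ hnd 5 (by omega) "saturday" rfl
    simpa using this
  have e6 : (PySem.Dict.ofList ps).keys.filter (fun d => pvDayIndexA d == (6 : Int))
      = if "sunday" ∈ (PySem.Dict.ofList ps).keys then ["sunday"] else [] := by
    have := pvFilterRankLt7 _ hnd 6 (by omega) "sunday" rfl
    simpa using this
  rw [pvSortedEqFlat]
  simp only [List.flatMap_cons, List.flatMap_nil, List.append_nil]
  rw [e0, e1, e2, e3, e4, e5, e6, pvFilterRank7]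
  have hmem : ∀ d : String, (PySem.Dict.ofList ps).contains d
      = decide (d ∈ (PySem.Dict.ofList ps).keys) := fun d =>
    PySem.Dict.contains_eq_decide_mem_keys _ _
  show List.filter _ ["monday", "tuesday", "wednesday", "thursday", "friday", "saturday", "sunday"] ++ _ = _
  simp only [List.filter_cons, List.filter_nil, hmem, decide_eq_true_eq]
  split_ifs <;> simp

-- ---- B characterization ----

theorem pvHeaderEq (day : String) :
    "[schedule]\nday = " ++ day ++ "\ntype = class"
      = PySem.Str.join "\n" ["[schedule]", "day = " ++ day, "type = class"] := by
  apply String.toList_inj.mp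
  rw [PySem.Str.toList_join]
  simp [PySem.Chars.join_cons_cons, PySem.Chars.join_singleton]

theorem pvB_eq (data : List (String × List (String × List (String × List (String × List (String × String)))))) :
    dict_to_ini_schedule_days_alt data
      = PySem.Str.join "\n\n" ((pvBlocks (PySem.Dict.ofList ((PySem.Dict.ofList data).getD "schedule" []))).map (PySem.Str.join "\n")) := by
  simp only [dict_to_ini_schedule_days_alt]
  have hday : (fun (blocks : List String) (day : String) =>
      (PySem.List.sorted (PySem.Dict.ofList ((PySem.Dict.ofList ((PySem.Dict.ofList ((PySem.Dict.ofList data).getD "schedule" [])).getD day [])).getD "class" [])).keys (fun t => t) false).foldl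
        (fun blocks time =>
          blocks ++ [PySem.Str.join "\n" (("time = " ++ time) ::
            (PySem.List.sorted2 (PySem.Dict.ofList ((PySem.Dict.ofList ((PySem.Dict.ofList ((PySem.Dict.ofList ((PySem.Dict.ofList data).getD "schedule" [])).getD day [])).getD "class" [])).getD time [])).items (·.1) (·.2) false).map
              (fun kv => if kv.1 == "type" then "lesson_type = " ++ kv.2 else kv.1 ++ " = " ++ kv.2))])
        (blocks ++ ["[schedule]\nday = " ++ day ++ "\ntype = class"]))
      = fun (blocks : List String) (day : String) =>
          blocks ++ (pvDayBlocks (PySem.Dict.ofList ((PySem.Dict.ofList data).getD "schedule" [])) day).map (PySem.Str.join "\n") := by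
    funext blocks day
    have eTime : (fun (blocks : List String) (time : String) =>
        blocks ++ [PySem.Str.join "\n" (("time = " ++ time) ::
          (PySem.List.sorted2 (PySem.Dict.ofList ((PySem.Dict.ofList ((PySem.Dict.ofList ((PySem.Dict.ofList ((PySem.Dict.ofList data).getD "schedule" [])).getD day [])).getD "class" [])).getD time [])).items (·.1) (·.2) false).map
            (fun kv => if kv.1 == "type" then "lesson_type = " ++ kv.2 else kv.1 ++ " = " ++ kv.2))])
        = fun (blocks : List String) (time : String) =>
            blocks ++ [PySem.Str.join "\n" (pvTimeRows (pvClassesOf (PySem.Dict.ofList ((PySem.Dict.ofList data).getD "schedule" [])) day) time)] := by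
      funext blocks time
      rfl
    rw [eTime, PySem.List.foldl_append_singleton_eq_map]
    rw [pvHeaderEq]
    simp only [pvDayBlocks, List.map_cons, List.map_map, List.append_assoc, List.singleton_append]
    rfl
  rw [hday, PySem.List.foldl_append_eq_flatMap, List.nil_append, pvDaysEq]
  rw [pvBlocks, List.map_flatMap]

-- ===== VERDICT (by name: the statement is the Claim_ definition above) =====
theorem dict_to_ini_schedule_days_spec : Claim_equal_dict_to_ini_schedule_days := by
  intro data _
  unfold Spec_dict_to_ini_schedule_days
  rw [pvA_eq, pvB_eq]
  exact pvStrJoinBlocks _ (pvBlocks_ne _)
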